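-- pv_equiv track=rewrite | github.com/DRIESASTER/python_scripts_1ba | parsons_code_dodona.py | maximale_afwijking
-- ===== SOURCE A (Python) =====
-- def maximale_afwijking(lijn):
--     min= 0
--     max= 0
--     current= 0
--     lastchar= ""
--     lijn= lijn.lower()
--     for i in lijn:
--         if i=="r":
--             i=lastchar
--         elif i=="u":
--             current+=1
--         elif i=="d":
--             current-=1
--         if current>max:
--             max=current
--         if current<min:
--             min=current
--         lastchar=i
--     koppel= (min,max)
--     return koppel
-- ===== SOURCE B (Python) =====
-- def maximale_afwijking(lijn):
--     stappen = [1 if c == "u" else -1 if c == "d" else 0 for c in lijn.lower()]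
--     prefix = [0]
--     for s in stappen:
--         prefix.append(prefix[-1] + s)
--     return (min(prefix), max(prefix))
-- ===== Notes on version B (the rewrite author's own statement) =====
-- stated objective: simpler
-- what changed: Replaces the fused min/max/current/lastchar tracking loop (whose 'r'-repeat branch is dead code) by a build-the-prefix-sum-table-then-reduce decomposition: map chars to +1/-1/0 steps, materialize cumulative sums starting at 0, return (min, max) of that table.
import Mathlib
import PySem

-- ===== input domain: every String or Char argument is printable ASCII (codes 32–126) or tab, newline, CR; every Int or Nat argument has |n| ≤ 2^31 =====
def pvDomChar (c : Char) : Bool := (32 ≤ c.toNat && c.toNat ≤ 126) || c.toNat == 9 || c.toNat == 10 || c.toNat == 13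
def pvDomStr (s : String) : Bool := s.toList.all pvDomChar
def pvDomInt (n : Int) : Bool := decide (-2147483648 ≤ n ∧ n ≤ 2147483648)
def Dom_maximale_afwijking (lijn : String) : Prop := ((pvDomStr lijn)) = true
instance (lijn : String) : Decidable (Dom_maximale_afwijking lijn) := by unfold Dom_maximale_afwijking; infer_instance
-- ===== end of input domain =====

-- B replaces A's fused tracking loop by a prefix-sum table built first and reduced with min/max (simpler decomposition; same O(n) cost).

-- ===== PORT A =====
-- literal transliteration of A's loop body: state (min, max, current, lastchar); the "r" branch
-- only rewrites the loop variable i (so lastchar), never current — exactly as in the Python.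
def pvAStep (st : Int × Int × Int × String) (c : Char) : Int × Int × Int × String :=
  let mn := st.1; let mx := st.2.1; let cur := st.2.2.1; let last := st.2.2.2
  let i : String := String.ofList [c]
  let p : String × Int :=
    if i == "r" then (last, cur)
    else if i == "u" then (i, cur + 1)
    else if i == "d" then (i, cur - 1)
    else (i, cur)
  let i := p.1; let cur := p.2
  let mx := if cur > mx then cur else mx
  let mn := if cur < mn then cur else mn
  (mn, mx, cur, i)

def maximale_afwijking (lijn : String) : Int × Int :=
  let l := PySem.Str.lower lijn
  let st := l.toList.foldl pvAStep (0, 0, 0, "")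
  (st.1, st.2.1)

-- ===== PORT B =====
def pvStep (c : Char) : Int := if c == 'u' then 1 else if c == 'd' then -1 else 0

def maximale_afwijking_alt (lijn : String) : Int × Int :=
  let stappen := (PySem.Str.lower lijn).toList.map pvStep
  let pref := stappen.foldl (fun (acc : List Int) s =>
      acc ++ [PySem.List.pyGetD acc (-1) 0 + s]) [0]
  -- min(prefix)/max(prefix): prefix is never empty, so Python's min/max return; getD 0 is unreachable
  ((PySem.List.min? pref (fun x => x)).getD 0,
   (PySem.List.max? pref (fun x => x)).getD 0)

-- ===== PRECONDITION & SPEC =====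
def Spec_maximale_afwijking (lijn : String) (out : Int × Int) : Prop := out = maximale_afwijking_alt lijn
instance (lijn : String) (out : Int × Int) : Decidable (Spec_maximale_afwijking lijn out) := by unfold Spec_maximale_afwijking; infer_instance

-- ===== CLAIM (what is proved, stated in full; the proofs are below) =====
def Claim_equal_maximale_afwijking : Prop := ∀ (lijn : String), Dom_maximale_afwijking lijn → Spec_maximale_afwijking lijn (maximale_afwijking lijn)

-- ===== LEMMAS AND PROOFS =====

-- the sequence of running values current takes, starting from cur
def pvRun (cs : List Char) (cur : Int) : List Int :=
  match cs with
  | [] => []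
  | c :: t => (cur + pvStep c) :: pvRun t (cur + pvStep c)

theorem pvSingNe (c c' : Char) (h : ¬ c = c') : ¬ String.ofList [c] = String.ofList [c'] := by
  intro hs
  exact h (by simpa using congrArg String.toList hs)

-- one step of A's loop, characterised
theorem pvAStep_eq (st : Int × Int × Int × String) (c : Char) :
    pvAStep st c =
      (min st.1 (st.2.2.1 + pvStep c), max st.2.1 (st.2.2.1 + pvStep c),
       st.2.2.1 + pvStep c, if c == 'r' then st.2.2.2 else String.ofList [c]) := by
  obtain ⟨mn, mx, cur, last⟩ := st
  by_cases h1 : c = 'r'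
  · subst h1
    simp [pvAStep, pvStep, min_def, max_def]
    constructor <;> (split_ifs <;> omega)
  · by_cases h2 : c = 'u'
    · subst h2
      simp [pvAStep, pvStep, min_def, max_def]
      constructor <;> (split_ifs <;> omega)
    · by_cases h3 : c = 'd'
      · subst h3
        simp [pvAStep, pvStep, min_def, max_def]
        constructor <;> (split_ifs <;> omega)
      · simp [pvAStep, pvStep, pvSingNe c 'r' h1, pvSingNe c 'u' h2, pvSingNe c 'd' h3,
          h1, h2, h3, min_def, max_def]
        constructor <;> (split_ifs <;> omega)

-- A's fold computes the running min/max over pvRun (plus current and lastchar)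
theorem pvA_fold (cs : List Char) (mn mx cur : Int) (last : String) :
    (cs.foldl pvAStep (mn, mx, cur, last)).1 = (pvRun cs cur).foldl min mn ∧
    (cs.foldl pvAStep (mn, mx, cur, last)).2.1 = (pvRun cs cur).foldl max mx := by
  induction cs generalizing mn mx cur last with
  | nil => simp [pvRun]
  | cons c t ih =>
    rw [List.foldl_cons, pvAStep_eq]
    simp only [pvRun, List.foldl_cons]
    exact ih _ _ _ _

-- B's fold builds acc ++ [x] ++ pvRun cs x
theorem pvB_fold (cs : List Char) (acc : List Int) (x : Int) :
    (cs.map pvStep).foldl (fun (acc : List Int) s =>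
        acc ++ [PySem.List.pyGetD acc (-1) 0 + s]) (acc ++ [x]) =
    (acc ++ [x]) ++ pvRun cs x := by
  induction cs generalizing acc x with
  | nil => simp [pvRun]
  | cons c t ih =>
    simp only [List.map_cons, List.foldl_cons, pvRun]
    rw [PySem.List.pyGetD_neg_one_append_singleton, List.append_assoc acc [x]]
    have := ih (acc ++ [x]) (x + pvStep c)
    simpa using this

theorem maximale_afwijking_eq (lijn : String) :
    maximale_afwijking lijn = maximale_afwijking_alt lijn := by
  unfold maximale_afwijking maximale_afwijking_alt
  simp only
  obtain ⟨h1, h2⟩ := pvA_fold (PySem.Str.lower lijn).toList 0 0 0 ""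
  rw [h1, h2]
  have hb := pvB_fold (PySem.Str.lower lijn).toList ([] : List Int) 0
  simp only [List.nil_append] at hb
  rw [hb]
  simp only [List.singleton_append]
  rw [PySem.List.min?_id_cons, PySem.List.max?_id_cons]
  simp

-- ===== VERDICT (by name: the statement is the Claim_ definition above) =====
theorem maximale_afwijking_spec : Claim_equal_maximale_afwijking := by
  intro lijn _
  unfold Spec_maximale_afwijking
  exact maximale_afwijking_eq lijn
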